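-- pv_equiv track=rewrite | github.com/hancock100percent/automation-machine | video-production/scripts/normalize_clips.py | get_stream_info
-- ===== SOURCE A (Python) =====
-- def get_stream_info(probe_data):
--     """Extract video and audio stream details from ffprobe output."""
--     video = None
--     audio = None
--     for stream in probe_data.get("streams", []):
--         if stream.get("codec_type") == "video" and video is None:
--             video = stream
--         elif stream.get("codec_type") == "audio" and audio is None:
--             audio = stream
--     return video, audio
-- ===== SOURCE B (Python) =====
-- def get_stream_info(probe_data):
--     """Extract video and audio stream details from ffprobe output."""
--     streams = probe_data.get("streams", [])
--     video = next((s for s in streams if s.get("codec_type") == "video"), None)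
--     audio = next((s for s in streams if s.get("codec_type") == "audio"), None)
--     return video, audio
-- ===== Notes on version B (the rewrite author's own statement) =====
-- stated objective: idiomatic
-- what changed: Replaces the single latched loop with mutable state by two independent short-circuiting first-match searches (next over a generator) for the first video and first audio stream.
import Mathlib
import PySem

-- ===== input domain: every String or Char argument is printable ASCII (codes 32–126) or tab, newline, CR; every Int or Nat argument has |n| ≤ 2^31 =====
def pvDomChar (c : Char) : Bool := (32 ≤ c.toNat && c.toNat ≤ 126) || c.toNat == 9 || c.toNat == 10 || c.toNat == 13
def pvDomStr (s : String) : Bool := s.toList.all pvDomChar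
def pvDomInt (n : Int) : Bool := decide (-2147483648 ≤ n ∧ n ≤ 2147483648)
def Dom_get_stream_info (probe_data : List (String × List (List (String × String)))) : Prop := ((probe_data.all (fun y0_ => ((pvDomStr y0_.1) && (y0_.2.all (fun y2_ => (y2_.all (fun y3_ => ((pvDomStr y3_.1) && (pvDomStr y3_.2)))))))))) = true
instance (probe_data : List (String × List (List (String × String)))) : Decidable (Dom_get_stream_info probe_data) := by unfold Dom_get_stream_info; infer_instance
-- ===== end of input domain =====

-- B replaces A's single latched loop by two independent short-circuiting first-match searches (idiomatic).

-- ===== PORT A =====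
-- step of A's for-loop over streams: latch first video, elif latch first audio
def pvStepA (st : Option (List (String × String)) × Option (List (String × String)))
    (stream : List (String × String)) :
    Option (List (String × String)) × Option (List (String × String)) :=
  if (PySem.Dict.mk stream).get? "codec_type" = some "video" ∧ st.1 = none then
    (some stream, st.2)
  else if (PySem.Dict.mk stream).get? "codec_type" = some "audio" ∧ st.2 = none then
    (st.1, some stream)
  else st

def get_stream_info (probe_data : List (String × List (List (String × String)))) :
    (Option (List (String × String))) × (Option (List (String × String))) :=
  ((PySem.Dict.mk probe_data).getD "streams" []).foldl pvStepA (none, none)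

-- ===== PORT B =====
def get_stream_info_alt (probe_data : List (String × List (List (String × String)))) :
    (Option (List (String × String))) × (Option (List (String × String))) :=
  let streams := (PySem.Dict.mk probe_data).getD "streams" []
  let video := streams.find? (fun s => (PySem.Dict.mk s).get? "codec_type" == some "video")
  let audio := streams.find? (fun s => (PySem.Dict.mk s).get? "codec_type" == some "audio")
  (video, audio)

-- ===== PRECONDITION & SPEC =====
def Spec_get_stream_info (probe_data : List (String × List (List (String × String)))) (out : (Option (List (String × String))) × (Option (List (String × String)))) : Prop := out = get_stream_info_alt probe_data
instance (probe_data : List (String × List (List (String × String)))) (out : (Option (List (String × String))) × (Option (List (String × String)))) : Decidable (Spec_get_stream_info probe_data out) := by unfold Spec_get_stream_info; infer_instance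

-- ===== CLAIM (what is proved, stated in full; the proofs are below) =====
def Claim_equal_get_stream_info : Prop := ∀ (probe_data : List (String × List (List (String × String)))), Dom_get_stream_info probe_data → Spec_get_stream_info probe_data (get_stream_info probe_data)

-- ===== LEMMAS AND PROOFS =====

-- A's fold from an arbitrary state fills each unset slot with the first match of its kind.
theorem pvFoldA_char (ss : List (List (String × String)))
    (v a : Option (List (String × String))) :
    ss.foldl pvStepA (v, a) =
      (v.orElse (fun _ => ss.find? (fun s => (PySem.Dict.mk s).get? "codec_type" == some "video")),
       a.orElse (fun _ => ss.find? (fun s => (PySem.Dict.mk s).get? "codec_type" == some "audio"))) := by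
  induction ss generalizing v a with
  | nil => cases v <;> cases a <;> rfl
  | cons s t ih =>
    simp only [List.foldl_cons, List.find?]
    by_cases h1 : (PySem.Dict.mk s).get? "codec_type" = some "video"
    · have hna : ¬ (PySem.Dict.mk s).get? "codec_type" = some "audio" := by rw [h1]; simp
      have ev : ((PySem.Dict.mk s).get? "codec_type" == some "video") = true := beq_iff_eq.mpr h1
      have ea : ((PySem.Dict.mk s).get? "codec_type" == some "audio") = false :=
        beq_eq_false_iff_ne.mpr hna
      cases v with
      | none =>
        rw [show pvStepA (none, a) s = (some s, a) from by simp [pvStepA, h1], ih]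
        simp [ev, ea]
      | some v' =>
        rw [show pvStepA (some v', a) s = (some v', a) from by simp [pvStepA, hna], ih]
        simp [ev, ea]
    · have ev : ((PySem.Dict.mk s).get? "codec_type" == some "video") = false :=
        beq_eq_false_iff_ne.mpr h1
      by_cases h2 : (PySem.Dict.mk s).get? "codec_type" = some "audio"
      · have ea : ((PySem.Dict.mk s).get? "codec_type" == some "audio") = true := beq_iff_eq.mpr h2
        cases a with
        | none =>
          rw [show pvStepA (v, none) s = (v, some s) from by simp [pvStepA, h2], ih]
          simp [ev, ea]
        | some a' =>
          rw [show pvStepA (v, some a') s = (v, some a') from by simp [pvStepA, h2], ih]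
          simp [ev, ea]
      · have ea : ((PySem.Dict.mk s).get? "codec_type" == some "audio") = false :=
          beq_eq_false_iff_ne.mpr h2
        rw [show pvStepA (v, a) s = (v, a) from by simp [pvStepA, h1, h2], ih]
        simp [ev, ea]

-- ===== VERDICT (by name: the statement is the Claim_ definition above) =====
theorem get_stream_info_spec : Claim_equal_get_stream_info := by
  intro probe_data _
  unfold Spec_get_stream_info get_stream_info get_stream_info_alt
  rw [pvFoldA_char]
  rfl
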